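-- pv_equiv track=rewrite | github.com/LuisEuqor/compila | pruebaafd.py | analizador_lexico
-- ===== SOURCE A (Python) =====
-- DIGITO = "[0-9]"
--
-- LETRA = "[a-zA-Z]"
--
-- AFD_NUM_ENTERO = {
--     "q0": {DIGITO: "q1"},
--     "q1": {DIGITO: "q1","default": "q2"},
--     "q2": {}
-- }
--
-- AFD_PALABRA = {
--     "q0": {LETRA: "q1"},
--     "q1": {LETRA: "q1",DIGITO: "q1","default": "q2"},
--     "q2": {}
-- }
--
-- def analizador_lexico(cadena):
--     estado_actual = "q0"
--     token_actual = ""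
--     tokens = []
--
--     for caracter in cadena:
--         if caracter.isdigit():
--             if estado_actual in AFD_NUM_ENTERO and DIGITO in AFD_NUM_ENTERO[estado_actual]:
--                 estado_actual = AFD_NUM_ENTERO[estado_actual][DIGITO]
--                 token_actual += caracter
--             else:
--                 tokens.append(token_actual)
--                 token_actual = caracter
--                 estado_actual = "q1"
--         elif caracter.isalpha():
--             if estado_actual in AFD_PALABRA and LETRA in AFD_PALABRA[estado_actual]:
--                 estado_actual = AFD_PALABRA[estado_actual][LETRA]
--                 token_actual += caracter
--             else:
--                 tokens.append(token_actual)
--                 token_actual = caracter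
--                 estado_actual = "q1"
--         else:
--             if estado_actual in AFD_NUM_ENTERO:
--                 tokens.append(token_actual)
--                 token_actual = ""
--                 estado_actual = "q0"
--             elif estado_actual in AFD_PALABRA:
--                 tokens.append(token_actual)
--                 token_actual = ""
--                 estado_actual = "q0"
--
--     tokens.append(token_actual)
--
--     return tokens
-- ===== SOURCE B (Python) =====
-- def analizador_lexico(cadena):
--     # collect separator positions once, then build tokens by slicing between them
--     seps = [i for i, c in enumerate(cadena) if not c.isdigit() and not c.isalpha()]
--     tokens = []
--     start = 0
--     for idx in seps:
--         tokens.append(cadena[start:idx])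
--         start = idx + 1
--     tokens.append(cadena[start:])
--     return tokens
-- ===== Notes on version B (the rewrite author's own statement) =====
-- stated objective: alternative
-- what changed: Replaces the char-by-char DFA state machine with string accumulator by a single scan that records separator indices followed by slicing the input between consecutive separators.
import Mathlib
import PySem

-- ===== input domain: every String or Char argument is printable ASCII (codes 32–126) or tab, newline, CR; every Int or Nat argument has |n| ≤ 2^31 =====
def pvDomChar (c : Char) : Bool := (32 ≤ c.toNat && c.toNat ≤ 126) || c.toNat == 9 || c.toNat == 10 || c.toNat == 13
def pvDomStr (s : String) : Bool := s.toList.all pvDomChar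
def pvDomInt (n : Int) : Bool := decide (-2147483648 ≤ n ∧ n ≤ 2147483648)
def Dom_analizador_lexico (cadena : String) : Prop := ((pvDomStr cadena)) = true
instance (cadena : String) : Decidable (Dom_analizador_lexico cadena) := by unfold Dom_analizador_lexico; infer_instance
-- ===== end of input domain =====

-- B replaces A's char-by-char DFA accumulation by one separator-index scan plus slicing (alternative decomposition, same cost).

-- ===== PORT A =====
def DIGITO : String := "[0-9]"
def LETRA : String := "[a-zA-Z]"
def AFD_NUM_ENTERO : PySem.Dict String (PySem.Dict String String) :=
  PySem.Dict.ofList [("q0", PySem.Dict.ofList [(DIGITO, "q1")]),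
                     ("q1", PySem.Dict.ofList [(DIGITO, "q1"), ("default", "q2")]),
                     ("q2", PySem.Dict.ofList [])]
def AFD_PALABRA : PySem.Dict String (PySem.Dict String String) :=
  PySem.Dict.ofList [("q0", PySem.Dict.ofList [(LETRA, "q1")]),
                     ("q1", PySem.Dict.ofList [(LETRA, "q1"), (DIGITO, "q1"), ("default", "q2")]),
                     ("q2", PySem.Dict.ofList [])]

-- one iteration of A's for-loop; state = (estado_actual, token_actual, tokens)
def pvStepA (st : String × List Char × List (List Char)) (caracter : Char) :
    String × List Char × List (List Char) :=
  match st with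
  | (estado, token, tokens) =>
    if PySem.Chars.isdigit caracter then
      if AFD_NUM_ENTERO.contains estado &&
         (AFD_NUM_ENTERO.getD estado PySem.Dict.empty).contains DIGITO then
        ((AFD_NUM_ENTERO.getD estado PySem.Dict.empty).getD DIGITO "", token ++ [caracter], tokens)
      else ("q1", [caracter], tokens ++ [token])
    else if PySem.Chars.isalpha caracter then
      if AFD_PALABRA.contains estado &&
         (AFD_PALABRA.getD estado PySem.Dict.empty).contains LETRA then
        ((AFD_PALABRA.getD estado PySem.Dict.empty).getD LETRA "", token ++ [caracter], tokens)
      else ("q1", [caracter], tokens ++ [token])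
    else
      if AFD_NUM_ENTERO.contains estado then ("q0", [], tokens ++ [token])
      else if AFD_PALABRA.contains estado then ("q0", [], tokens ++ [token])
      else (estado, token, tokens)

def analizador_lexico (cadena : String) : List String :=
  let r := cadena.toList.foldl pvStepA ("q0", [], [])
  (r.2.2 ++ [r.2.1]).map String.ofList

-- ===== PORT B =====
-- separator test: not c.isdigit() and not c.isalpha()
def pvSep (c : Char) : Bool := !(PySem.Chars.isdigit c) && !(PySem.Chars.isalpha c)

-- one iteration of B's for-loop over separator indices; state = (start, tokens)
def pvStepB (cs : List Char) (st : Int × List (List Char)) (idx : Int) :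
    Int × List (List Char) :=
  (idx + 1, st.2 ++ [PySem.List.slice cs (some st.1) (some idx)])

def analizador_lexico_alt (cadena : String) : List String :=
  let cs := cadena.toList
  let seps := ((PySem.List.enumerate cs 0).filter (fun p => pvSep p.2)).map (·.1)
  let r := seps.foldl (pvStepB cs) ((0 : Int), [])
  (r.2 ++ [PySem.List.slice cs (some r.1) none]).map String.ofList

-- ===== PRECONDITION & SPEC =====
def Spec_analizador_lexico (cadena : String) (out : List String) : Prop := out = analizador_lexico_alt cadena
instance (cadena : String) (out : List String) : Decidable (Spec_analizador_lexico cadena out) := by unfold Spec_analizador_lexico; infer_instance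

-- ===== CLAIM (what is proved, stated in full; the proofs are below) =====
def Claim_equal_analizador_lexico : Prop := ∀ (cadena : String), Dom_analizador_lexico cadena → Spec_analizador_lexico cadena (analizador_lexico cadena)

-- ===== LEMMAS AND PROOFS =====

-- the common mathematical splitter both ports compute
def pvSplit (acc : List Char) : List Char → List (List Char)
  | [] => [acc]
  | c :: cs => if pvSep c then acc :: pvSplit [] cs else pvSplit (acc ++ [c]) cs

def pvIdxs (cs : List Char) (s : Int) : List Int :=
  ((PySem.List.enumerate cs s).filter (fun p => pvSep p.2)).map (·.1)

lemma stepA_digit (e : String) (tok : List Char) (ts : List (List Char)) (c : Char)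
    (he : e = "q0" ∨ e = "q1") (hd : PySem.Chars.isdigit c = true) :
    pvStepA (e, tok, ts) c = ("q1", tok ++ [c], ts) := by
  rcases he with h | h <;> subst h <;> simp [pvStepA, hd] <;> rfl

lemma stepA_alpha (e : String) (tok : List Char) (ts : List (List Char)) (c : Char)
    (he : e = "q0" ∨ e = "q1") (hd : PySem.Chars.isdigit c = false)
    (ha : PySem.Chars.isalpha c = true) :
    pvStepA (e, tok, ts) c = ("q1", tok ++ [c], ts) := by
  rcases he with h | h <;> subst h <;> simp [pvStepA, hd, ha] <;> rfl

lemma stepA_sep (e : String) (tok : List Char) (ts : List (List Char)) (c : Char)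
    (he : e = "q0" ∨ e = "q1") (hd : PySem.Chars.isdigit c = false)
    (ha : PySem.Chars.isalpha c = false) :
    pvStepA (e, tok, ts) c = ("q0", [], ts ++ [tok]) := by
  rcases he with h | h <;> subst h <;> simp [pvStepA, hd, ha] <;> decide

lemma foldA (cs : List Char) : ∀ (e : String) (tok : List Char) (ts : List (List Char)),
    (e = "q0" ∨ e = "q1") →
    (cs.foldl pvStepA (e, tok, ts)).2.2 ++ [(cs.foldl pvStepA (e, tok, ts)).2.1]
      = ts ++ pvSplit tok cs := by
  induction cs with
  | nil => intro e tok ts _; simp [pvSplit]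
  | cons c cs ih =>
    intro e tok ts he
    by_cases hd : PySem.Chars.isdigit c = true
    · rw [List.foldl_cons, stepA_digit e tok ts c he hd, ih "q1" _ _ (Or.inr rfl)]
      simp [pvSplit, pvSep, hd]
    · by_cases ha : PySem.Chars.isalpha c = true
      · rw [List.foldl_cons,
          stepA_alpha e tok ts c he (Bool.eq_false_iff.mpr hd) ha, ih "q1" _ _ (Or.inr rfl)]
        simp [pvSplit, pvSep, hd, ha]
      · rw [List.foldl_cons,
          stepA_sep e tok ts c he (Bool.eq_false_iff.mpr hd) (Bool.eq_false_iff.mpr ha),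
          ih "q0" _ _ (Or.inl rfl)]
        simp [pvSplit, pvSep, hd, ha]

lemma foldB (cs : List Char) : ∀ (full : List Char) (start off : Nat) (ts : List (List Char)),
    start ≤ off → full.drop off = cs →
    ((pvIdxs cs (off : Int)).foldl (pvStepB full) ((start : Int), ts)).2
      ++ [PySem.List.slice full
            (some ((pvIdxs cs (off : Int)).foldl (pvStepB full) ((start : Int), ts)).1) none]
      = ts ++ pvSplit ((full.drop start).take (off - start)) cs := by
  induction cs with
  | nil =>
    intro full start off ts hso hdrop
    have hlen : full.length ≤ off := List.drop_eq_nil_iff.mp hdrop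
    have : (full.drop start).take (off - start) = full.drop start := by
      apply List.take_of_length_le; simp; omega
    simp [pvIdxs, PySem.List.enumerate_nil, pvSplit, this,
      PySem.List.slice_from_natCast]
  | cons c cs ih =>
    intro full start off ts hso hdrop
    have hofflt : off < full.length := by
      by_contra h
      rw [List.drop_eq_nil_iff.mpr (by omega)] at hdrop; simp at hdrop
    have hget : full[off] = c := by
      have h0 : (full.drop off)[0]'(by simp [hdrop]) = c := by simp [hdrop]
      rw [List.getElem_drop] at h0
      simpa using h0
    have hdrop' : full.drop (off + 1) = cs := by
      have h1 : (full.drop off).drop 1 = full.drop (off + 1) := by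
        rw [List.drop_drop]
      rw [← h1, hdrop, List.drop_one, List.tail_cons]
    have hidx : pvIdxs (c :: cs) (off : Int)
        = if pvSep c then (off : Int) :: pvIdxs cs ((off : Int) + 1)
          else pvIdxs cs ((off : Int) + 1) := by
      simp [pvIdxs, PySem.List.enumerate_cons]
      by_cases h : pvSep c = true <;> simp [h]
    by_cases hsep : pvSep c = true
    · rw [hidx, if_pos hsep, List.foldl_cons]
      have : pvStepB full ((start : Int), ts) (off : Int)
          = (((off + 1 : Nat) : Int), ts ++ [(full.drop start).take (off - start)]) := by
        simp [pvStepB, PySem.List.slice_natCast]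
      rw [this]
      have hIH := ih full (off + 1) (off + 1) (ts ++ [(full.drop start).take (off - start)])
        (le_refl _) hdrop'
      push_cast at hIH ⊢
      rw [hIH]
      simp [pvSplit, hsep]
    · rw [hidx, if_neg hsep]
      have hIH := ih full start (off + 1) ts (by omega) hdrop'
      push_cast at hIH ⊢
      rw [hIH]
      have htake : (full.drop start).take (off + 1 - start)
          = (full.drop start).take (off - start) ++ [c] := by
        have hlt : off - start < (full.drop start).length := by simp; omega
        rw [show off + 1 - start = (off - start) + 1 by omega, List.take_add_one]
        have hc : (full.drop start)[off - start]? = some c := by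
          rw [List.getElem?_eq_getElem hlt]
          congr 1
          rw [List.getElem_drop]
          simp only [show start + (off - start) = off from by omega]
          exact hget
        simp [hc]
      rw [htake]
      simp [pvSplit, hsep]

-- ===== VERDICT (by name: the statement is the Claim_ definition above) =====
theorem analizador_lexico_spec : Claim_equal_analizador_lexico := by
  intro cadena _
  unfold Spec_analizador_lexico analizador_lexico analizador_lexico_alt
  dsimp only
  have hA := foldA cadena.toList "q0" [] [] (Or.inl rfl)
  have hB := foldB cadena.toList cadena.toList 0 0 [] (le_refl 0) (by simp)
  simp only [Nat.cast_zero] at hB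
  simp only [pvIdxs] at hB
  simp only [List.nil_append] at hA hB
  simp only [List.drop_zero, List.take_zero, Nat.sub_zero] at hB
  rw [hA, ← hB]
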